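-- pv_equiv track=rewrite | github.com/luciobx/NSI_formation | 22_NSIJ2ME1/Exercice_2_B_Duchamps Stephan.py | parcourir_pile_en_reduisant
-- ===== SOURCE A (Python) =====
-- def creer_pile_vide() :
--     return []
--
-- def est_vide(p):
--     """Renvoie le booléen True si la pile est vide, False sinon."""
--     return p==[]
--
-- def empiler(p, element):
--     """Place l'élément v au sommet de la pile"""
--     p.append(element)
--
-- def depiler(p):
--     """
--     Retire et renvoie l’élément placé au sommet de la pile,
--     si la pile n’est pas vide.
--     """
--     if not est_vide(p):
--         return p.pop()
--     else:
--         return None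
--
-- def sommet(p):
--     """
--     Renvoie l’élément placé au sommet de la pile,
--     si la pile n’est pas vide.
--     """
--     if not est_vide(p):
--         return p[-1]
--     else:
--         return None
--
-- def taille(p):
--     """
--     Renvoie la taille de la pile,
--     """
--     return len(p)
--
-- def reduire_triplet_au_sommet(p):
--     a = depiler(p)
--     b = depiler(p)
--     c = sommet(p)
--     if a % 2 != c%2 :
--         empiler(p, b)
--     empiler(p, a)
--
-- def parcourir_pile_en_reduisant(p):
--     q = creer_pile_vide()
--     p=list(p) # pour dissocier de l'adresse memoire de p
--     while taille(p) >= 3 :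
--         reduire_triplet_au_sommet(p)
--         e = depiler(p)
--         empiler(q, e)
--     while not est_vide(q):
--         e = depiler(q)
--         empiler(p, e)
--     return p
-- ===== SOURCE B (Python) =====
-- def parcourir_pile_en_reduisant(p):
--     # Single left-to-right pass over the reversed list (top-first), no stacks.
--     r = p[::-1]
--     n = len(r)
--     out = []
--     i = 0
--     while i < n - 2:
--         out.append(r[i])
--         i += 2 if r[i] % 2 == r[i + 2] % 2 else 1
--     out.extend(r[i:])
--     return out[::-1]
-- ===== Notes on version B (the rewrite author's own statement) =====
-- stated objective: simpler
-- what changed: Replaces the two auxiliary stacks (pop/push triplet reduction plus a second reversal-transfer loop) by a single left-to-right pass over the reversed list that emits elements and skips the middle one when parities agree.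
import Mathlib
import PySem

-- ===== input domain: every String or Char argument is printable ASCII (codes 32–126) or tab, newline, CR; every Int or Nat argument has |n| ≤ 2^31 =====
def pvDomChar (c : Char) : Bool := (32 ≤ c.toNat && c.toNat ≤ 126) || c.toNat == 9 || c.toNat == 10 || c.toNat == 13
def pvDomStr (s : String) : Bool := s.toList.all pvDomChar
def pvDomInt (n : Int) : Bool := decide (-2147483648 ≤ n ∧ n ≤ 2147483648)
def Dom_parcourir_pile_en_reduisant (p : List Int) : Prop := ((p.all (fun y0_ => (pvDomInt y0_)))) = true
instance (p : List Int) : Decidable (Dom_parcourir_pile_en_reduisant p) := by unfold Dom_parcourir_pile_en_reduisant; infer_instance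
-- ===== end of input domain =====

-- B replaces the two auxiliary stacks and the reversal transfer by one left-to-right
-- pass over the reversed list (objective: simpler); return value only, no mutation.


-- ===== PORT A =====
-- depiler(p): pop the top (= last) element; None on the empty pile
def pvDepiler (p : List Int) : Option Int × List Int :=
  if p = [] then (none, p) else (p.getLast?, p.dropLast)

-- sommet(p)
def pvSommet (p : List Int) : Option Int :=
  if p = [] then none else p.getLast?

-- reduire_triplet_au_sommet(p); the None branch is unreachable under the
-- caller's guard taille(p) >= 3 (Python would raise TypeError on None % 2)
def pvReduire (p : List Int) : List Int :=
  let d1 := pvDepiler p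
  let d2 := pvDepiler d1.2
  match d1.1, d2.1, pvSommet d2.2 with
  | some a, some b, some c =>
      (if PySem.Int.mod a 2 ≠ PySem.Int.mod c 2 then d2.2 ++ [b] else d2.2) ++ [a]
  | _, _, _ => d2.2

-- first while loop; fuel = initial length of p is always sufficient
def pvLoopA : Nat → List Int → List Int → List Int × List Int
  | 0, p, q => (p, q)
  | fuel + 1, p, q =>
      if 3 ≤ p.length then
        let d := pvDepiler (pvReduire p)
        pvLoopA fuel d.2 (q ++ [d.1.getD 0])
      else (p, q)

-- second while loop (transfer q back onto p)
def pvLoopT : Nat → List Int → List Int → List Int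
  | 0, p, _ => p
  | fuel + 1, p, q =>
      if q = [] then p
      else
        let d := pvDepiler q
        pvLoopT fuel (p ++ [d.1.getD 0]) d.2

def parcourir_pile_en_reduisant (p : List Int) : List Int :=
  let r := pvLoopA p.length p []
  pvLoopT r.2.length r.1 r.2

-- ===== PORT B =====
-- the while loop of B: walk the reversed list, emitting the current element and
-- skipping the middle one when the parities of r[i] and r[i+2] agree
def pvLoopB : List Int → List Int → List Int
  | a :: b :: c :: rest, out =>
      if PySem.Int.mod a 2 = PySem.Int.mod c 2 then pvLoopB (c :: rest) (out ++ [a])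
      else pvLoopB (b :: c :: rest) (out ++ [a])
  | xs, out => out ++ xs
termination_by r _ => r.length
decreasing_by all_goals (simp; try omega)

def parcourir_pile_en_reduisant_alt (p : List Int) : List Int :=
  (pvLoopB p.reverse []).reverse

-- ===== PRECONDITION & SPEC =====
def Spec_parcourir_pile_en_reduisant (p : List Int) (out : List Int) : Prop := out = parcourir_pile_en_reduisant_alt p
instance (p : List Int) (out : List Int) : Decidable (Spec_parcourir_pile_en_reduisant p out) := by unfold Spec_parcourir_pile_en_reduisant; infer_instance

-- ===== CLAIM (what is proved, stated in full; the proofs are below) =====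
def Claim_equal_parcourir_pile_en_reduisant : Prop := ∀ (p : List Int), Dom_parcourir_pile_en_reduisant p → Spec_parcourir_pile_en_reduisant p (parcourir_pile_en_reduisant p)

-- ===== LEMMAS AND PROOFS =====

-- the common specification: reduce a top-first list
def pvRed : List Int → List Int
  | a :: b :: c :: rest =>
      if PySem.Int.mod a 2 = PySem.Int.mod c 2 then a :: pvRed (c :: rest)
      else a :: pvRed (b :: c :: rest)
  | xs => xs
termination_by r => r.length
decreasing_by all_goals (simp; try omega)

lemma pvLoopB_spec (r out : List Int) : pvLoopB r out = out ++ pvRed r := by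
  fun_induction pvLoopB r out with
  | case1 a b c rest out h ih => rw [ih, pvRed, if_pos h]; simp
  | case2 a b c rest out h ih => rw [ih, pvRed, if_neg h]; simp
  | case3 xs out h => cases xs with
    | nil => simp [pvRed]
    | cons x t => cases t with
      | nil => simp [pvRed]
      | cons y u => cases u with
        | nil => simp [pvRed]
        | cons z v => exact absurd rfl (h x y z v)

lemma pvDepiler_concat (l : List Int) (x : Int) : pvDepiler (l ++ [x]) = (some x, l) := by
  simp [pvDepiler]

lemma pvSommet_concat (l : List Int) (x : Int) : pvSommet (l ++ [x]) = some x := by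
  simp [pvSommet]

lemma pvRed_short (l : List Int) (h : l.length < 3) : pvRed l = l := by
  match l with
  | [] => simp [pvRed]
  | [x] => simp [pvRed]
  | [x, y] => simp [pvRed]
  | x :: y :: z :: t => simp at h; omega

lemma pvLoopT_spec (fuel : Nat) (p q : List Int) (h : q.length ≤ fuel) :
    pvLoopT fuel p q = p ++ q.reverse := by
  induction fuel generalizing p q with
  | zero =>
      have : q = [] := List.eq_nil_of_length_eq_zero (Nat.le_zero.mp h)
      simp [pvLoopT, this]
  | succ n ih =>
      by_cases hq : q = []
      · simp [pvLoopT, hq]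
      · obtain ⟨l, x, rfl⟩ := (List.eq_nil_or_concat q).resolve_left hq
        have hl : l.length ≤ n := by simp at h ⊢; omega
        rw [pvLoopT, if_neg hq, List.concat_eq_append, pvDepiler_concat]
        simp only [Option.getD_some]
        rw [ih (p ++ [x]) l hl]
        simp

lemma pvLoopA_spec (fuel : Nat) (p q : List Int) (h : p.length ≤ fuel) :
    (pvLoopA fuel p q).1 ++ (pvLoopA fuel p q).2.reverse
      = (pvRed p.reverse).reverse ++ q.reverse := by
  induction fuel generalizing p q with
  | zero =>
      have : p = [] := List.eq_nil_of_length_eq_zero (Nat.le_zero.mp h)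
      simp [pvLoopA, this, pvRed]
  | succ n ih =>
      by_cases h3 : 3 ≤ p.length
      · -- p.reverse = a :: b :: c :: rest
        have hr : 3 ≤ p.reverse.length := by simpa using h3
        match hrev : p.reverse with
        | [] => rw [hrev] at hr; simp at hr
        | [a] => rw [hrev] at hr; simp at hr
        | [a, b] => rw [hrev] at hr; simp at hr
        | a :: b :: c :: rest =>
          have hp : p = ((rest.reverse ++ [c]) ++ [b]) ++ [a] := by
            have := congrArg List.reverse hrev
            simpa using this
          subst hp
          rw [pvLoopA]
          simp only [if_pos h3]
          have hred : pvReduire (((rest.reverse ++ [c]) ++ [b]) ++ [a])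
              = (if PySem.Int.mod a 2 ≠ PySem.Int.mod c 2
                  then (rest.reverse ++ [c]) ++ [b] else rest.reverse ++ [c]) ++ [a] := by
            simp only [pvReduire, pvDepiler_concat, pvSommet_concat]
          rw [hred]
          by_cases hpar : PySem.Int.mod a 2 = PySem.Int.mod c 2
          · -- same parity: b is dropped
            simp only [hpar, ne_eq, not_true_eq_false, if_false]
            rw [pvDepiler_concat]
            simp only [Option.getD_some]
            have hlen : (rest.reverse ++ [c]).length ≤ n := by
              have : (((rest.reverse ++ [c]) ++ [b]) ++ [a]).length ≤ n + 1 := h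
              simp at this ⊢; omega
            rw [ih (rest.reverse ++ [c]) (q ++ [a]) hlen]
            rw [show (rest.reverse ++ [c]).reverse = c :: rest by simp]
            rw [pvRed, if_pos hpar]
            simp
          · -- different parity: b is kept
            simp only [ne_eq, hpar, not_false_eq_true, if_true]
            rw [pvDepiler_concat]
            simp only [Option.getD_some]
            have hlen : ((rest.reverse ++ [c]) ++ [b]).length ≤ n := by
              have : (((rest.reverse ++ [c]) ++ [b]) ++ [a]).length ≤ n + 1 := h
              simp at this ⊢; omega
            rw [ih ((rest.reverse ++ [c]) ++ [b]) (q ++ [a]) hlen]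
            rw [show ((rest.reverse ++ [c]) ++ [b]).reverse = b :: c :: rest by simp]
            rw [pvRed, if_neg hpar]
            simp
      · rw [pvLoopA]
        simp only [if_neg h3]
        have : pvRed p.reverse = p.reverse := pvRed_short _ (by simp; omega)
        simp [this]

-- ===== VERDICT (by name: the statement is the Claim_ definition above) =====
theorem parcourir_pile_en_reduisant_spec : Claim_equal_parcourir_pile_en_reduisant := by
  intro p _
  unfold Spec_parcourir_pile_en_reduisant parcourir_pile_en_reduisant parcourir_pile_en_reduisant_alt
  rw [pvLoopB_spec]
  have hA := pvLoopA_spec p.length p [] (le_refl _)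
  rw [pvLoopT_spec _ _ _ (le_refl _)]
  simpa using hA
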